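-- pv_equiv track=rewrite | github.com/artachobruno/Athlete-Space---Backend | app/coach/services/chat_service.py | _is_simple_greeting
-- ===== SOURCE A (Python) =====
-- def _is_simple_greeting(message: str) -> bool:
--     """Check if message is a simple greeting (not a query).
--
--     Args:
--         message: User message to check
--
--     Returns:
--         True if message is a simple greeting without a query
--     """
--     message_lower = message.lower().strip()
--     greetings = [
--         "hi",
--         "hello",
--         "hey",
--         "hi there",
--         "hello there",
--         "hey there",
--         "good morning",
--         "good afternoon",
--         "good evening",
--         "",
--     ]
--     # Check if message is just a greeting (exact match or starts with greeting)
--     if message_lower in greetings: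
--         return True
--     # Check if message is just a greeting followed by nothing meaningful
--     for greeting in greetings:
--         if greeting and message_lower.startswith(greeting):
--             # If the message is just the greeting or greeting + punctuation/whitespace
--             remainder = message_lower[len(greeting):].strip()
--             if not remainder or remainder in {".", "!", "?", ",", ":", ";"}:
--                 return True
--     return False
-- ===== SOURCE B (Python) =====
-- _GREETINGS = (
--     {a + b for a in ("hi", "hello", "hey") for b in ("", " there")}
--     | {"good " + t for t in ("morning", "afternoon", "evening")}
-- )
--
--
-- def _is_simple_greeting(message: str) -> bool:
--     """Check if message is a simple greeting (not a query)."""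
--     m = message.lower().strip()
--     if not m:
--         return True
--     core = m[:-1].strip() if m[-1] in ".!?,:;" else m
--     return core in _GREETINGS
-- ===== Notes on version B (the rewrite author's own statement) =====
-- stated objective: simpler
-- what changed: B drops A's startswith-loop over the greeting list entirely: it normalizes once (lower/strip, then strips at most one trailing punctuation mark plus whitespace) and answers with a single membership test in a greeting set built compositionally from parts (hi/hello/hey x optional ' there', plus 'good '+time-of-day).
import Mathlib
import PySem

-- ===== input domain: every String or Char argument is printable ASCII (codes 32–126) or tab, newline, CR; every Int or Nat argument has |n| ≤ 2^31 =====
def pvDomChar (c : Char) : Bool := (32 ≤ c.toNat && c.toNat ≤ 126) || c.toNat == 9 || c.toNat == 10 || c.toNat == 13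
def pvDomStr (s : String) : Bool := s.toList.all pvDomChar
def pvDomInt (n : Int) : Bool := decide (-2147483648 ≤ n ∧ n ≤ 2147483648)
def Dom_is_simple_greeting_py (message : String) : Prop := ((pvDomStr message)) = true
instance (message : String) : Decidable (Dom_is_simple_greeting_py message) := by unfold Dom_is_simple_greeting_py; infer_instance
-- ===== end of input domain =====

-- B replaces A's startswith-scan over the greeting list by one normalization (strip at most one
-- trailing punctuation mark plus whitespace) followed by a single membership test in a greeting
-- set built compositionally from its parts; objective: simpler, same observable result.

-- ===== PORT A =====
-- the literal `greetings` list of A, in Python order (note the trailing "")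
def pvGreetingsA : List (List Char) :=
  [['h','i'], ['h','e','l','l','o'], ['h','e','y'],
   ['h','i',' ','t','h','e','r','e'], ['h','e','l','l','o',' ','t','h','e','r','e'],
   ['h','e','y',' ','t','h','e','r','e'],
   ['g','o','o','d',' ','m','o','r','n','i','n','g'], ['g','o','o','d',' ','a','f','t','e','r','n','o','o','n'],
   ['g','o','o','d',' ','e','v','e','n','i','n','g'], []]

-- A's literal set {".", "!", "?", ",", ":", ";"} of one-character strings
def pvPunctA : PySem.Set (List Char) :=
  PySem.Set.ofList [['.'], ['!'], ['?'], [','], [':'], [';']]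

def is_simple_greeting_py (message : String) : Bool :=
  let message_lower := PySem.Chars.strip (PySem.Chars.lower message.toList)
  if pvGreetingsA.contains message_lower then true
  else
    pvGreetingsA.foldl (fun acc greeting =>
      if acc then true
      else if !greeting.isEmpty && PySem.Chars.startswith message_lower greeting then
        let remainder := PySem.Chars.strip (PySem.List.slice message_lower (some (greeting.length : Int)) none)
        if remainder.isEmpty || PySem.Set.contains pvPunctA remainder then true else acc
      else acc) false

-- ===== PORT B =====
-- Source B's _GREETINGS, built compositionally from parts as in Source B's set comprehension
-- (PySem.Set is compared as a finite set, so the build order is immaterial)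
def pvGreetingsB : PySem.Set (List Char) :=
  PySem.Set.ofList
    ((([['h','i'], ['h','e','l','l','o'], ['h','e','y']].flatMap
        (fun a => [[], [' ','t','h','e','r','e']].map (fun b => a ++ b))) ++
      ([['m','o','r','n','i','n','g'], ['a','f','t','e','r','n','o','o','n'], ['e','v','e','n','i','n','g']].map
        (fun t => ['g','o','o','d',' '] ++ t))))

-- Source B's punctuation string ".!?,:;"; `c in str` for one char is char membership, exact here
def pvPunctChars : List Char := ['.', '!', '?', ',', ':', ';']

def is_simple_greeting_py_alt (message : String) : Bool :=
  let m := PySem.Chars.strip (PySem.Chars.lower message.toList)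
  if m.isEmpty then true
  else
    let core :=
      match PySem.List.pyGet? m (-1) with
      | some c =>
          if pvPunctChars.contains c then
            PySem.Chars.strip (PySem.List.slice m none (some (-1)))
          else m
      | none => m
    PySem.Set.contains pvGreetingsB core

-- ===== PRECONDITION & SPEC =====
def Spec_is_simple_greeting_py (message : String) (out : Bool) : Prop := out = is_simple_greeting_py_alt message
instance (message : String) (out : Bool) : Decidable (Spec_is_simple_greeting_py message out) := by unfold Spec_is_simple_greeting_py; infer_instance

-- ===== CLAIM (what is proved, stated in full; the proofs are below) =====
def Claim_equal_is_simple_greeting_py : Prop := ∀ (message : String), Dom_is_simple_greeting_py message → Spec_is_simple_greeting_py message (is_simple_greeting_py message)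

-- ===== LEMMAS AND PROOFS =====

-- A's early-return for-loop, as the foldl the port uses, is an `any`
theorem pv_foldl_loop {α : Type} (c1 c2 : α → Bool) (l : List α) (b : Bool) :
    l.foldl (fun acc g => if acc then true else if c1 g then (if c2 g then true else acc) else acc) b
      = (b || l.any (fun g => c1 g && c2 g)) := by
  have hfun : (fun (acc : Bool) g => if acc then true else if c1 g then (if c2 g then true else acc) else acc)
      = (fun (acc : Bool) g => acc || (c1 g && c2 g)) := by
    funext acc g; cases acc <;> cases c1 g <;> cases c2 g <;> simp
  rw [hfun]
  induction l generalizing b with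
  | nil => simp
  | cons x xs ih => rw [List.foldl_cons, ih, List.any_cons]; cases b <;> simp

theorem pv_head_strip (u : List Char) (c : Char)
    (h : (PySem.Chars.strip u).head? = some c) : PySem.Chars.isspace c = false := by
  have hpre : PySem.Chars.strip u <+: PySem.Chars.lstrip u := by
    simp only [PySem.Chars.strip, PySem.Chars.rstrip]
    have := List.dropWhile_suffix (l := (PySem.Chars.lstrip u).reverse) PySem.Chars.isspace
    obtain ⟨t, ht⟩ := this
    exact ⟨t.reverse, by rw [← List.reverse_append, ht, List.reverse_reverse]⟩
  obtain ⟨t, ht⟩ := hpre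
  have hne : PySem.Chars.strip u ≠ [] := by intro h0; rw [h0] at h; simp at h
  have hhead : (PySem.Chars.lstrip u).head? = some c := by
    rw [← ht, List.head?_append_of_ne_nil _ hne, h]
  have := List.head?_dropWhile_not PySem.Chars.isspace u
  simp only [PySem.Chars.lstrip] at hhead
  rw [hhead] at this; simpa using this

theorem pv_last_strip (u : List Char) (c : Char)
    (h : (PySem.Chars.strip u).getLast? = some c) : PySem.Chars.isspace c = false := by
  simp only [PySem.Chars.strip, PySem.Chars.rstrip, List.getLast?_reverse] at h
  have := List.head?_dropWhile_not PySem.Chars.isspace (PySem.Chars.lstrip u).reverse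
  rw [h] at this; simpa using this

theorem pv_strip_decomp (u : List Char) :
    ∃ a b, u = a ++ PySem.Chars.strip u ++ b ∧
      (∀ c ∈ a, PySem.Chars.isspace c = true) ∧ (∀ c ∈ b, PySem.Chars.isspace c = true) := by
  refine ⟨u.takeWhile PySem.Chars.isspace,
    ((u.dropWhile PySem.Chars.isspace).reverse.takeWhile PySem.Chars.isspace).reverse, ?_, ?_, ?_⟩
  · have h1 := List.takeWhile_append_dropWhile (p := PySem.Chars.isspace) (l := u)
    have h2 := List.takeWhile_append_dropWhile (p := PySem.Chars.isspace)
      (l := (u.dropWhile PySem.Chars.isspace).reverse)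
    have h3 := congrArg List.reverse h2
    simp only [List.reverse_append, List.reverse_reverse] at h3
    simp only [PySem.Chars.strip, PySem.Chars.rstrip, PySem.Chars.lstrip]
    conv_lhs => rw [← h1, ← h3]
    simp [List.append_assoc]
  · exact fun c hc => List.mem_takeWhile_imp hc
  · exact fun c hc => List.mem_takeWhile_imp (List.mem_reverse.mp hc)

theorem pv_strip_nil (u : List Char) (h : PySem.Chars.strip u = []) :
    ∀ c ∈ u, PySem.Chars.isspace c = true := by
  obtain ⟨a, b, hu, ha, hb⟩ := pv_strip_decomp u
  rw [h] at hu
  intro c hc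
  rw [hu] at hc
  simp at hc
  rcases hc with hc | hc
  · exact ha c hc
  · exact hb c hc

-- strip of a word with no whitespace at its ends followed by whitespace is the word
theorem pv_strip_word_ws (g a : List Char) (hg : g ≠ [])
    (hh : ∀ c ∈ g.head?, PySem.Chars.isspace c = false)
    (hl : ∀ c ∈ g.getLast?, PySem.Chars.isspace c = false)
    (ha : ∀ c ∈ a, PySem.Chars.isspace c = true) :
    PySem.Chars.strip (g ++ a) = g := by
  obtain ⟨x, g', rfl⟩ := List.exists_cons_of_ne_nil hg
  have hx : PySem.Chars.isspace x = false := hh x (by simp)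
  simp only [PySem.Chars.strip, PySem.Chars.lstrip, PySem.Chars.rstrip]
  rw [List.cons_append, List.dropWhile_cons_of_neg (by simp [hx])]
  have hrev : (x :: (g' ++ a)).reverse = a.reverse ++ (x :: g').reverse := by simp
  rw [hrev, List.dropWhile_append_of_pos (by simpa using fun c hc => ha c hc)]
  obtain ⟨y, r, hr⟩ := List.exists_cons_of_ne_nil (List.reverse_ne_nil_iff.mpr (List.cons_ne_nil x g'))
  have hy : (x :: g').getLast? = some y := by
    rw [← List.head?_reverse, hr]; rfl
  rw [hr, List.dropWhile_cons_of_neg (by simp [hl y hy]), ← hr, List.reverse_reverse]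

-- strip of whitespace followed by one non-whitespace char is that char
theorem pv_strip_ws_char (a : List Char) (p : Char)
    (ha : ∀ c ∈ a, PySem.Chars.isspace c = true) (hp : PySem.Chars.isspace p = false) :
    PySem.Chars.strip (a ++ [p]) = [p] := by
  simp only [PySem.Chars.strip, PySem.Chars.lstrip, PySem.Chars.rstrip]
  rw [List.dropWhile_append_of_pos ha, List.dropWhile_cons_of_neg (by simp [hp])]
  simp [List.dropWhile_cons_of_neg (by simp [hp] : ¬PySem.Chars.isspace p = true)]

-- the compositional Set.ofList value, evaluated (elements are distinct, build order kept)
set_option maxRecDepth 2000 in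
theorem pv_gb_unf : (pvGreetingsB : List (List Char)) =
    [['h','i'], ['h','i',' ','t','h','e','r','e'],
     ['h','e','l','l','o'], ['h','e','l','l','o',' ','t','h','e','r','e'],
     ['h','e','y'], ['h','e','y',' ','t','h','e','r','e'],
     ['g','o','o','d',' ','m','o','r','n','i','n','g'], ['g','o','o','d',' ','a','f','t','e','r','n','o','o','n'],
     ['g','o','o','d',' ','e','v','e','n','i','n','g']] := by decide

set_option maxRecDepth 2000 in
theorem pv_pa_unf : (pvPunctA : List (List Char)) = [['.'], ['!'], ['?'], [','], [':'], [';']] := by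
  decide

-- concrete facts about the literal greeting / punctuation sets
theorem pv_gb_facts : ∀ g ∈ (pvGreetingsB : List (List Char)), g ≠ [] ∧
    (∀ c ∈ g.head?, PySem.Chars.isspace c = false) ∧
    (∀ c ∈ g.getLast?, PySem.Chars.isspace c = false) := by
  rw [pv_gb_unf]
  intro g hg
  simp only [List.mem_cons, List.not_mem_nil, or_false] at hg
  rcases hg with rfl|rfl|rfl|rfl|rfl|rfl|rfl|rfl|rfl <;>
    exact ⟨by simp, by intro c hc; simp at hc; subst hc; decide,
      by intro c hc; simp at hc; subst hc; decide⟩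

theorem pv_gb_last_not_punct : ∀ g ∈ (pvGreetingsB : List (List Char)),
    ∀ c ∈ g.getLast?, pvPunctChars.contains c = false := by
  rw [pv_gb_unf]
  intro g hg
  simp only [List.mem_cons, List.not_mem_nil, or_false] at hg
  rcases hg with rfl|rfl|rfl|rfl|rfl|rfl|rfl|rfl|rfl <;>
    (intro c hc; simp at hc; subst hc; decide)

theorem pv_punct_not_space : ∀ c ∈ pvPunctChars, PySem.Chars.isspace c = false := by
  intro c hc
  simp only [pvPunctChars, List.mem_cons, List.not_mem_nil, or_false] at hc
  rcases hc with rfl|rfl|rfl|rfl|rfl|rfl <;> decide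

-- membership in A's greeting list is membership in B's set, or emptiness
theorem pv_mem_ga (x : List Char) :
    x ∈ pvGreetingsA ↔ (x ∈ (pvGreetingsB : List (List Char)) ∨ x = []) := by
  rw [pv_gb_unf]
  simp only [pvGreetingsA, List.mem_cons, List.not_mem_nil, or_false]
  tauto

theorem pv_punctA_eq : (pvPunctA : List (List Char)) = pvPunctChars.map (fun c => [c]) := by
  rw [pv_pa_unf]; rfl

-- the combinatorial heart: on a stripped non-empty message the two acceptance conditions agree
theorem pv_core (s : List Char) (hne : s ≠ []) (c : Char) (hgl : s.getLast? = some c)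
    (hh : ∀ d ∈ s.head?, PySem.Chars.isspace d = false)
    (hl : ∀ d ∈ s.getLast?, PySem.Chars.isspace d = false) :
    (s ∈ pvGreetingsA ∨ ∃ g ∈ pvGreetingsA, (g ≠ [] ∧ g <+: s) ∧
        (PySem.Chars.strip (s.drop g.length) = [] ∨ PySem.Chars.strip (s.drop g.length) ∈ pvPunctA))
    ↔ (s ∈ (pvGreetingsB : List (List Char)) ∨
        (c ∈ pvPunctChars ∧ PySem.Chars.strip s.dropLast ∈ (pvGreetingsB : List (List Char)))) := by
  constructor
  · rintro (hmem | ⟨g, hgA, ⟨hgne, hpre⟩, hR⟩)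
    · left
      rcases (pv_mem_ga s).mp hmem with h | h
      · exact h
      · exact absurd h hne
    · have hgB : g ∈ (pvGreetingsB : List (List Char)) := by
        rcases (pv_mem_ga g).mp hgA with h | h
        · exact h
        · exact absurd h hgne
      obtain ⟨_, hghead, hglast⟩ := pv_gb_facts g hgB
      have hs : g ++ s.drop g.length = s := List.prefix_iff_eq_append.mp hpre
      rcases hR with h0 | hp
      · -- remainder is all whitespace: it must be empty, so s = g
        have hws := pv_strip_nil _ h0
        cases ht : s.drop g.length with
        | nil => left; rw [← hs, ht, List.append_nil]; exact hgB
        | cons d r =>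
          exfalso
          have h1 : s.getLast? = (s.drop g.length).getLast? := by
            conv_lhs => rw [← hs]
            exact List.getLast?_append_of_ne_nil _ (by simp [ht])
          have h3 : c ∈ s.drop g.length := List.mem_of_getLast? (by rw [← h1, hgl])
          have h5 := hl c hgl
          rw [hws c h3] at h5; exact absurd h5 (by simp)
      · -- remainder strips to a single punctuation char
        rw [pv_punctA_eq] at hp
        obtain ⟨p, hpP, hstript⟩ := List.mem_map.mp hp
        obtain ⟨a, b, hdecomp, hA, hB⟩ := pv_strip_decomp (s.drop g.length)
        rw [← hstript] at hdecomp
        have hb : b = [] := by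
          cases hbe : b with
          | nil => rfl
          | cons d r =>
            exfalso
            have h1 : s.getLast? = b.getLast? := by
              conv_lhs => rw [← hs, hdecomp]
              rw [← List.append_assoc, ← List.append_assoc]
              exact List.getLast?_append_of_ne_nil _ (by simp [hbe])
            have h3 : c ∈ b := List.mem_of_getLast? (by rw [← h1, hgl])
            have h5 := hl c hgl
            rw [hB c h3] at h5; exact absurd h5 (by simp)
        rw [hb, List.append_nil] at hdecomp
        have hseq : s = (g ++ a) ++ [p] := by
          rw [← hs, hdecomp]; simp [List.append_assoc]
        have hcp : c = p := by
          have := hgl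
          rw [hseq, List.getLast?_concat] at this
          exact (Option.some.injEq _ _ ▸ this.symm : _)
        right
        refine ⟨hcp ▸ hpP, ?_⟩
        have hdl : s.dropLast = g ++ a := by rw [hseq, List.dropLast_concat]
        rw [hdl, pv_strip_word_ws g a hgne hghead hglast hA]
        exact hgB
  · rintro (hmem | ⟨hcP, hstrip⟩)
    · left; exact (pv_mem_ga s).mpr (Or.inl hmem)
    · obtain ⟨hgne, _, _⟩ := pv_gb_facts _ hstrip
      obtain ⟨a, b, hdecomp, hA, hB⟩ := pv_strip_decomp s.dropLast
      have hsplit : s = s.dropLast ++ [c] := by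
        obtain ⟨l', hl'⟩ := List.getLast?_eq_some_iff.mp hgl
        rw [hl', List.dropLast_concat]
      have ha : a = [] := by
        cases hae : a with
        | nil => rfl
        | cons d r =>
          exfalso
          have h1 : s.head? = a.head? := by
            conv_lhs => rw [hsplit, hdecomp]
            rw [List.append_assoc, List.append_assoc]
            exact List.head?_append_of_ne_nil _ (by simp [hae])
          have hhd : s.head? = some d := by rw [h1, hae]; rfl
          have h5 := hh d hhd
          rw [hA d (by simp [hae])] at h5; exact absurd h5 (by simp)
      rw [ha, List.nil_append] at hdecomp
      set g := PySem.Chars.strip s.dropLast with hg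
      have hseq : s = g ++ (b ++ [c]) := by
        conv_lhs => rw [hsplit, hdecomp]
        simp [List.append_assoc]
      right
      refine ⟨g, ?_, ⟨hgne, ⟨b ++ [c], hseq.symm⟩⟩, Or.inr ?_⟩
      · exact (pv_mem_ga g).mpr (Or.inl hstrip)
      · have hdrop : s.drop g.length = b ++ [c] := by rw [hseq, List.drop_left]
        rw [hdrop, pv_strip_ws_char b c hB (pv_punct_not_space c hcP)]
        rw [pv_punctA_eq]
        exact List.mem_map.mpr ⟨c, hcP, rfl⟩

-- a non-empty stripped message ending in punctuation is not itself a greeting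
theorem pv_not_gb_of_punct (s : List Char) (c : Char) (hgl : s.getLast? = some c)
    (hcP : pvPunctChars.contains c = true) : s ∉ (pvGreetingsB : List (List Char)) := by
  intro hmem
  have := pv_gb_last_not_punct s hmem c hgl
  rw [hcP] at this; exact absurd this (by simp)

theorem pv_main (message : String) :
    is_simple_greeting_py message = is_simple_greeting_py_alt message := by
  unfold is_simple_greeting_py is_simple_greeting_py_alt
  set s := PySem.Chars.strip (PySem.Chars.lower message.toList) with hs
  by_cases hne : s = []
  · rw [hne]; rw [pv_pa_unf]; decide
  · have hh : ∀ d ∈ s.head?, PySem.Chars.isspace d = false := by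
      intro d hd; exact pv_head_strip _ d (by rw [← hs]; exact hd)
    have hl : ∀ d ∈ s.getLast?, PySem.Chars.isspace d = false := by
      intro d hd; exact pv_last_strip _ d (by rw [← hs]; exact hd)
    obtain ⟨c, hgl⟩ := Option.ne_none_iff_exists'.mp (by simpa using hne : s.getLast? ≠ none)
    dsimp only
    rw [pv_foldl_loop (fun g => !g.isEmpty && PySem.Chars.startswith s g)
      (fun g => (PySem.Chars.strip (PySem.List.slice s (some (g.length : Int)) none)).isEmpty
        || PySem.Set.contains pvPunctA (PySem.Chars.strip (PySem.List.slice s (some (g.length : Int)) none)))]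
    rw [PySem.List.pyGet?_neg_one, hgl]
    have hie : s.isEmpty = false := by simpa using hne
    simp only [hie, Bool.false_eq_true, if_false, Bool.false_or,
      PySem.List.slice_from_natCast, PySem.List.slice_to_neg_one, Bool.if_true_left]
    by_cases hcP : pvPunctChars.contains c = true
    · -- trailing punctuation: B checks the stripped dropLast; A's disjunction collapses to it
      rw [if_pos hcP]
      rw [Bool.eq_iff_iff]
      simp only [Bool.or_eq_true, Bool.and_eq_true, List.any_eq_true, List.contains_iff_mem,
        PySem.Chars.startswith_iff, List.isEmpty_iff, Bool.not_eq_eq_eq_not, Bool.not_true,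
        PySem.Set.contains, decide_eq_true_eq, List.isEmpty_eq_false_iff]
      rw [pv_core s hne c hgl hh hl]
      have hnot := pv_not_gb_of_punct s c hgl hcP
      have hc' : c ∈ pvPunctChars := by simpa using hcP
      constructor
      · rintro (h | ⟨_, h⟩)
        · exact absurd h hnot
        · exact h
      · intro h; exact Or.inr ⟨hc', h⟩
    · -- no trailing punctuation: B checks s itself; A's punctuation branch cannot fire
      rw [if_neg hcP]
      rw [Bool.eq_iff_iff]
      simp only [Bool.or_eq_true, Bool.and_eq_true, List.any_eq_true, List.contains_iff_mem,
        PySem.Chars.startswith_iff, List.isEmpty_iff, Bool.not_eq_eq_eq_not, Bool.not_true,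
        PySem.Set.contains, decide_eq_true_eq, List.isEmpty_eq_false_iff]
      rw [pv_core s hne c hgl hh hl]
      have hc' : c ∉ pvPunctChars := by
        intro h; exact hcP (by simpa using h)
      constructor
      · rintro (h | ⟨h, _⟩)
        · exact h
        · exact absurd h hc'
      · exact Or.inl

-- ===== VERDICT (by name: the statement is the Claim_ definition above) =====
theorem is_simple_greeting_py_spec : Claim_equal_is_simple_greeting_py := by
  intro message _
  unfold Spec_is_simple_greeting_py
  exact pv_main message
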